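-- pv_equiv track=rewrite | github.com/ankostis/polyvers | polyvers/engrave.py | _as_glob_pattern_pair
-- ===== SOURCE A (Python) =====
-- def _as_glob_pattern_pair(fpath):
--     """
--     Add '**' in relative names, eliminate comments and split in positive/negatives
--
--     :return:
--         a 2-tuple(positive, negative), one always None
--     """
--     fpath = fpath.strip()
--
--     ## Remove comments/empty-lines.
--     if not fpath or fpath.startswith('#') or fpath.startswith('..'):
--         return (None, None)
--
--     if fpath.startswith('!'):
--         # raise NotImplementedError('Negative match pattern %r not supported!' %
--         #                           fpath)
--         (positive, negative) = _as_glob_pattern_pair(fpath[1:])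
--         return (negative, positive)
--
--     ## TODO: Handle '!' and escaping with '\' like .gitignore
--     if fpath.startswith(('./', '/')):
--         fpath = fpath.lstrip('./')
--         fpath = fpath.lstrip('/')
--     else:
--         fpath = '**/' + fpath
--
--     return (fpath.replace('\\', ''), None)
-- ===== SOURCE B (Python) =====
-- def _as_glob_pattern_pair(fpath):
--     """
--     Iterative re-implementation: peel all leading negation markers up front (re-stripping after
--     each peel) while counting the flips, then run the guard and prefix logic once
--     and swap the pair by flip parity.
--     """
--     fpath = fpath.strip()
--     flips = 0
--     while fpath.startswith('!'):
--         flips += 1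
--         fpath = fpath[1:].strip()
--     if not fpath or fpath.startswith('#') or fpath.startswith('..'):
--         return (None, None)
--     if fpath.startswith(('./', '/')):
--         pat = fpath.lstrip('./').lstrip('/')
--     else:
--         pat = '**/' + fpath
--     pat = pat.replace('\\', '')
--     return (None, pat) if flips % 2 != 0 else (pat, None)
-- ===== Notes on version B (the rewrite author's own statement) =====
-- stated objective: simpler
-- what changed: Replaces A's self-recursion (peel one negation marker, recurse, swap the returned pair) with a single up-front negation-peeling loop that counts flips, one guard/prefix pass, and a final swap by flip parity.
import Mathlib
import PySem

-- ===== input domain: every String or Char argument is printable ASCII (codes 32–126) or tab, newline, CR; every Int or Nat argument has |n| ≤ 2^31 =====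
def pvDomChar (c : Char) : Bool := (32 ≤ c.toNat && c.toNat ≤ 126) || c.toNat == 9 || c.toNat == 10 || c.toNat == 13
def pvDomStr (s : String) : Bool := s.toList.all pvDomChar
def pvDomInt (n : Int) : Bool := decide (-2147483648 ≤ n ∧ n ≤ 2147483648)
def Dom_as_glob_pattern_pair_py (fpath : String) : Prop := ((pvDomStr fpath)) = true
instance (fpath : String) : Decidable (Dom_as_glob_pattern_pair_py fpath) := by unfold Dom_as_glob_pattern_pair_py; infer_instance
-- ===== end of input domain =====

-- B replaces A's self-recursion (peel one negation marker, recurse, swap the returned pair) by a single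
-- up-front negation-peeling loop that counts the flips, one guard check, and a final swap by parity
-- (objective: simpler / alternative decomposition; same cost).

-- termination helper for both ports: stripping never lengthens a string
theorem pvStripLen (s : List Char) : (PySem.Chars.strip s).length ≤ s.length := by
  simp only [PySem.Chars.strip, PySem.Chars.lstrip, PySem.Chars.rstrip, List.length_reverse]
  exact le_trans (List.length_dropWhile_le _ _) (by simpa using List.length_dropWhile_le _ _)

-- ===== PORT A =====
-- literal transliteration of _as_glob_pattern_pair; Python str.lstrip(chars) is exact as
-- List.dropWhile (membership in chars) on the left side.
def aGo (cs : List Char) : Option String × Option String :=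
  let s := PySem.Chars.strip cs
  if s = [] ∨ PySem.Chars.startswith s ['#'] ∨ PySem.Chars.startswith s ['.', '.'] then
    (none, none)
  else if h : PySem.Chars.startswith s ['!'] then
    let pn := aGo (PySem.List.slice s (some 1) none)
    (pn.2, pn.1)
  else
    let s2 :=
      if PySem.Chars.startswith s ['.', '/'] || PySem.Chars.startswith s ['/'] then
        (s.dropWhile (fun c => c = '.' ∨ c = '/')).dropWhile (fun c => c = '/')
      else
        '*' :: '*' :: '/' :: s
    (some (String.ofList (PySem.Chars.replace s2 ['\\'] [])), none)
termination_by cs.length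
decreasing_by
  have h1 : s ≠ [] := by
    intro e; rw [e] at h; simp [PySem.Chars.startswith] at h
  have h2 : s.length ≤ cs.length := pvStripLen cs
  have h3 : s.length ≠ 0 := by simpa [List.length_eq_zero_iff] using h1
  rw [PySem.List.slice_from s (by norm_num)]
  simp only [List.length_drop]
  omega

def as_glob_pattern_pair_py (fpath : String) : Option String × Option String :=
  aGo fpath.toList

-- ===== PORT B =====
-- the negation-peeling while loop of Source B: peel one marker, re-strip, count the flip
def bPeel (s : List Char) (flips : Int) : List Char × Int :=
  if h : PySem.Chars.startswith s ['!'] then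
    bPeel (PySem.Chars.strip (PySem.List.slice s (some 1) none)) (flips + 1)
  else
    (s, flips)
termination_by s.length
decreasing_by
  have h1 : s ≠ [] := by intro e; subst e; simp [PySem.Chars.startswith] at h
  have h2 := pvStripLen (PySem.List.slice s (some 1) none)
  have h3 : s.length ≠ 0 := by simpa [List.length_eq_zero_iff] using h1
  rw [PySem.List.slice_from s (by norm_num)] at h2 ⊢
  simp only [List.length_drop] at h2 ⊢
  omega

-- the straight-line tail of Source B after the loop: guard, prefix logic, parity swap
def bFinish (s : List Char) (flips : Int) : Option String × Option String :=
  if s = [] ∨ PySem.Chars.startswith s ['#'] ∨ PySem.Chars.startswith s ['.', '.'] then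
    (none, none)
  else
    let pat :=
      if PySem.Chars.startswith s ['.', '/'] || PySem.Chars.startswith s ['/'] then
        (s.dropWhile (fun c => c = '.' ∨ c = '/')).dropWhile (fun c => c = '/')
      else
        '*' :: '*' :: '/' :: s
    let pat := PySem.Chars.replace pat ['\\'] []
    if PySem.Int.mod flips 2 ≠ 0 then (none, some (String.ofList pat))
    else (some (String.ofList pat), none)

def as_glob_pattern_pair_py_alt (fpath : String) : Option String × Option String :=
  let r := bPeel (PySem.Chars.strip fpath.toList) 0
  bFinish r.1 r.2

-- ===== PRECONDITION & SPEC =====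
def Spec_as_glob_pattern_pair_py (fpath : String) (out : Option String × Option String) : Prop := out = as_glob_pattern_pair_py_alt fpath
instance (fpath : String) (out : Option String × Option String) : Decidable (Spec_as_glob_pattern_pair_py fpath out) := by unfold Spec_as_glob_pattern_pair_py; infer_instance

-- ===== CLAIM (what is proved, stated in full; the proofs are below) =====
def Claim_equal_as_glob_pattern_pair_py : Prop := ∀ (fpath : String), Dom_as_glob_pattern_pair_py fpath → Spec_as_glob_pattern_pair_py fpath (as_glob_pattern_pair_py fpath)

-- ===== LEMMAS AND PROOFS =====

theorem bPeel_of_not_bang (s : List Char) (flips : Int)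
    (h : PySem.Chars.startswith s ['!'] = false) : bPeel s flips = (s, flips) := by
  unfold bPeel; simp [h]

theorem bPeel_of_bang (s : List Char) (flips : Int)
    (h : PySem.Chars.startswith s ['!'] = true) :
    bPeel s flips = bPeel (PySem.Chars.strip (PySem.List.slice s (some 1) none)) (flips + 1) := by
  conv_lhs => unfold bPeel
  simp [h]

theorem bang_ne_nil (s : List Char) (h : PySem.Chars.startswith s ['!'] = true) : s ≠ [] := by
  intro e; subst e; simp [PySem.Chars.startswith] at h

-- the flip counter is an accumulator: starting it at `flips` just shifts the result
theorem bPeel_shift_aux (n : Nat) : ∀ (s : List Char), s.length ≤ n → ∀ (flips : Int),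
    bPeel s flips = ((bPeel s 0).1, flips + (bPeel s 0).2) := by
  induction n with
  | zero =>
    intro s hs flips
    have he : s = [] := List.length_eq_zero_iff.mp (Nat.le_zero.mp hs)
    subst he
    rw [bPeel_of_not_bang _ _ (by simp [PySem.Chars.startswith]),
        bPeel_of_not_bang _ _ (by simp [PySem.Chars.startswith])]
    simp
  | succ n ih =>
    intro s hs flips
    by_cases h : PySem.Chars.startswith s ['!'] = true
    · have hne : s ≠ [] := bang_ne_nil s h
      have hlen : (PySem.Chars.strip (PySem.List.slice s (some 1) none)).length ≤ n := by
        have h2 := pvStripLen (PySem.List.slice s (some 1) none)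
        rw [PySem.List.slice_from s (by norm_num)] at h2 ⊢
        simp only [List.length_drop] at h2
        have : s.length ≠ 0 := by simpa [List.length_eq_zero_iff] using hne
        omega
      rw [bPeel_of_bang _ _ h, bPeel_of_bang _ 0 h,
          ih _ hlen (flips + 1), ih _ hlen (0 + 1)]
      refine Prod.ext rfl ?_
      simp; ring
    · rw [bPeel_of_not_bang _ _ (by simpa using h), bPeel_of_not_bang _ 0 (by simpa using h)]
      simp

theorem bPeel_shift (s : List Char) (flips : Int) :
    bPeel s flips = ((bPeel s 0).1, flips + (bPeel s 0).2) :=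
  bPeel_shift_aux s.length s le_rfl flips

-- one extra flip swaps the finished pair
theorem bFinish_succ (s : List Char) (f : Int) :
    bFinish s (1 + f) = ((bFinish s f).2, (bFinish s f).1) := by
  have hmod : (PySem.Int.mod (1 + f) 2 ≠ 0) ↔ (PySem.Int.mod f 2 = 0) := by
    simp [PySem.Int.mod, Int.fmod_eq_emod]; omega
  unfold bFinish
  by_cases hg : (s = [] ∨ PySem.Chars.startswith s ['#'] = true ∨
      PySem.Chars.startswith s ['.', '.'] = true)
  · simp only [if_pos hg]
  · simp only [if_neg hg]
    by_cases hp : PySem.Int.mod f 2 = 0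
    · rw [if_pos (hmod.mpr hp), if_neg (not_not.mpr hp)]
    · rw [if_neg (fun hh => hp (hmod.mp hh)), if_pos hp]

-- the guard conditions exclude a leading negation marker
theorem guard_not_bang (s : List Char)
    (h : s = [] ∨ PySem.Chars.startswith s ['#'] = true ∨ PySem.Chars.startswith s ['.', '.'] = true) :
    PySem.Chars.startswith s ['!'] = false := by
  rcases h with h|h|h <;> cases s <;> simp_all [PySem.Chars.startswith, List.isPrefixOf] <;>
    (rintro rfl; simp_all)

-- main induction: A's recursion equals peel-then-finish
theorem aGo_eq_aux (n : Nat) : ∀ (cs : List Char), cs.length ≤ n →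
    aGo cs = bFinish (bPeel (PySem.Chars.strip cs) 0).1 (bPeel (PySem.Chars.strip cs) 0).2 := by
  induction n with
  | zero =>
    intro cs hcs
    have he : cs = [] := List.length_eq_zero_iff.mp (Nat.le_zero.mp hcs)
    subst he
    have hg : (PySem.Chars.strip ([] : List Char) = [] ∨
        PySem.Chars.startswith (PySem.Chars.strip []) ['#'] = true ∨
        PySem.Chars.startswith (PySem.Chars.strip []) ['.', '.'] = true) := Or.inl rfl
    rw [bPeel_of_not_bang _ _ (guard_not_bang _ hg)]
    unfold aGo bFinish
    simp [hg]
  | succ n ih =>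
    intro cs hcs
    by_cases hg : (PySem.Chars.strip cs = [] ∨
        PySem.Chars.startswith (PySem.Chars.strip cs) ['#'] = true ∨
        PySem.Chars.startswith (PySem.Chars.strip cs) ['.', '.'] = true)
    · rw [bPeel_of_not_bang _ _ (guard_not_bang _ hg)]
      unfold aGo bFinish
      simp [hg]
    · by_cases hb : PySem.Chars.startswith (PySem.Chars.strip cs) ['!'] = true
      · have hne : PySem.Chars.strip cs ≠ [] := bang_ne_nil _ hb
        have hlen : (PySem.List.slice (PySem.Chars.strip cs) (some 1) none).length ≤ n := by
          have h2 := pvStripLen cs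
          have h3 : (PySem.Chars.strip cs).length ≠ 0 := by
            simpa [List.length_eq_zero_iff] using hne
          rw [PySem.List.slice_from (PySem.Chars.strip cs) (by norm_num)]
          simp only [List.length_drop]
          omega
        have hA : aGo cs = ((aGo (PySem.List.slice (PySem.Chars.strip cs) (some 1) none)).2,
                            (aGo (PySem.List.slice (PySem.Chars.strip cs) (some 1) none)).1) := by
          conv_lhs => unfold aGo
          simp [hg, hb]
        have hR : bPeel (PySem.Chars.strip cs) 0 =
            ((bPeel (PySem.Chars.strip (PySem.List.slice (PySem.Chars.strip cs) (some 1) none)) 0).1,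
             1 + (bPeel (PySem.Chars.strip (PySem.List.slice (PySem.Chars.strip cs) (some 1) none)) 0).2) := by
          rw [bPeel_of_bang _ _ hb, bPeel_shift]
          norm_num
        rw [hA, ih _ hlen, hR]
        dsimp only
        rw [bFinish_succ]
      · rw [bPeel_of_not_bang _ _ (by simpa using hb)]
        unfold aGo bFinish
        simp [hg, hb, PySem.Int.mod, Int.fmod_eq_emod]

theorem aGo_eq (cs : List Char) :
    aGo cs = bFinish (bPeel (PySem.Chars.strip cs) 0).1 (bPeel (PySem.Chars.strip cs) 0).2 :=
  aGo_eq_aux cs.length cs le_rfl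

-- ===== VERDICT (by name: the statement is the Claim_ definition above) =====
theorem as_glob_pattern_pair_py_spec : Claim_equal_as_glob_pattern_pair_py := by
  intro fpath _
  unfold Spec_as_glob_pattern_pair_py as_glob_pattern_pair_py as_glob_pattern_pair_py_alt
  exact aGo_eq fpath.toList
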